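-- pv_equiv track=rewrite | github.com/mxbraun4/autonomous-startup | src/agents/master_planner.py | _parse_goals
-- ===== SOURCE A (Python) =====
-- from typing import Dict, Any, List
--
-- def _parse_goals(goals_text: str) -> List[Dict[str, str]]:
--     """Parse goals from LLM output.
--
--     Args:
--         goals_text: Goals text from LLM
--
--     Returns:
--         List of goal dicts
--     """
--     goals = []
--
--     # Extract goals for each planner type
--     planner_types = ['Data Strategy', 'Product Strategy', 'Outreach Strategy']
--
--     for planner_type in planner_types:
--         # Simple extraction: find lines mentioning the planner type
--         for line in goals_text.split('\n'):
--             if planner_type.lower() in line.lower():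
--                 goal_text = line.split(':', 1)[1].strip() if ':' in line else line
--                 goals.append({
--                     'type': planner_type.lower().replace(' ', '_'),
--                     'description': goal_text
--                 })
--                 break
--
--     # If parsing failed, create default goals
--     if not goals:
--         goals = [
--             {'type': 'data_strategy', 'description': 'Improve data coverage and quality'},
--             {'type': 'product_strategy', 'description': 'Enhance platform tools and features'},
--             {'type': 'outreach_strategy', 'description': 'Optimize outreach campaigns'}
--         ]
--
--     return goals
-- ===== SOURCE B (Python) =====
-- def _parse_goals(goals_text):
--     """Parse goals from LLM output (single pass over the lines)."""
--     planner_types = ['Data Strategy', 'Product Strategy', 'Outreach Strategy']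
--     found = {}
--     for line in goals_text.split('\n'):
--         low = line.lower()
--         for planner_type in planner_types:
--             if planner_type not in found and planner_type.lower() in low:
--                 found[planner_type] = line.split(':', 1)[1].strip() if ':' in line else line
--     goals = [{'type': pt.lower().replace(' ', '_'), 'description': found[pt]}
--              for pt in planner_types if pt in found]
--     if not goals:
--         goals = [
--             {'type': 'data_strategy', 'description': 'Improve data coverage and quality'},
--             {'type': 'product_strategy', 'description': 'Enhance platform tools and features'},
--             {'type': 'outreach_strategy', 'description': 'Optimize outreach campaigns'}
--         ]
--     return goals
-- ===== Notes on version B (the rewrite author's own statement) =====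
-- stated objective: alternative
-- what changed: B replaces A's three full scans of the line list (one per planner type, with break) by a single pass over the lines that records the first matching description per type in a first-wins dict, then emits the goals in planner-type order.
import Mathlib
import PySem

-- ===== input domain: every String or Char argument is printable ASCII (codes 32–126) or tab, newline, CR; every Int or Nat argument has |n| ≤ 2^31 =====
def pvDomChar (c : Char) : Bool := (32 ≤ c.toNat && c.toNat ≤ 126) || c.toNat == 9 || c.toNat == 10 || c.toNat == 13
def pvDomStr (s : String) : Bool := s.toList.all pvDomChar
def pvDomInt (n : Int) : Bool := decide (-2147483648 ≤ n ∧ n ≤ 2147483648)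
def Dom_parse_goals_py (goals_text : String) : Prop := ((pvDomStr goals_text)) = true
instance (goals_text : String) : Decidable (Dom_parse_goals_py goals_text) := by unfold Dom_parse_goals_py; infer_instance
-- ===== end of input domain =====

-- B does one pass over the lines with a first-wins dict instead of A's one scan per planner type; return value proved equal on all inputs.

-- shared helpers: expressions that occur verbatim in BOTH Python sources
def pvPlannerTypes : List String := ["Data Strategy", "Product Strategy", "Outreach Strategy"]

-- goals_text.split('\n'); the separator "\n" is a nonempty literal, so split? is always `some`
def pvLines (goals_text : String) : List String := (PySem.Str.split? goals_text "\n").getD []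

-- planner_type.lower().replace(' ', '_')
def pvTypeKey (pt : String) : String := PySem.Str.replace (PySem.Str.lower pt) " " "_"

-- line.split(':', 1)[1].strip() if ':' in line else line
def pvDesc (line : String) : String :=
  if PySem.Str.isIn ":" line then
    match PySem.Str.splitMax? line ":" 1 with
    | some (_ :: rest :: _) => PySem.Str.strip rest
    | _ => line
  else line

def pvDefaults : List (List (String × String)) :=
  [[("type", "data_strategy"), ("description", "Improve data coverage and quality")],
   [("type", "product_strategy"), ("description", "Enhance platform tools and features")],
   [("type", "outreach_strategy"), ("description", "Optimize outreach campaigns")]]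

-- ===== PORT A =====
-- for each planner type, scan all lines and take the first match (for … break = List.find?)
def parse_goals_py (goals_text : String) : List (List (String × String)) :=
  let lines := pvLines goals_text
  let goals := pvPlannerTypes.foldl (fun goals pt =>
    match lines.find? (fun line => PySem.Str.isIn (PySem.Str.lower pt) (PySem.Str.lower line)) with
    | some line => goals ++ [[("type", pvTypeKey pt), ("description", pvDesc line)]]
    | none => goals) []
  if goals = [] then pvDefaults else goals

-- ===== PORT B =====
-- one step of B's single pass: try each planner type against the current line, first-wins
def pvStep (found : PySem.Dict String String) (line : String) : PySem.Dict String String :=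
  let low := PySem.Str.lower line
  pvPlannerTypes.foldl (fun found pt =>
    if !found.contains pt && PySem.Str.isIn (PySem.Str.lower pt) low
    then found.insert pt (pvDesc line) else found) found

def parse_goals_py_alt (goals_text : String) : List (List (String × String)) :=
  let found := (pvLines goals_text).foldl pvStep PySem.Dict.empty
  let goals := pvPlannerTypes.filterMap (fun pt =>
    (PySem.Dict.get? found pt).map (fun d => [("type", pvTypeKey pt), ("description", d)]))
  if goals = [] then pvDefaults else goals

-- ===== PRECONDITION & SPEC =====
def Spec_parse_goals_py (goals_text : String) (out : List (List (String × String))) : Prop := out = parse_goals_py_alt goals_text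
instance (goals_text : String) (out : List (List (String × String))) : Decidable (Spec_parse_goals_py goals_text out) := by unfold Spec_parse_goals_py; infer_instance

-- ===== CLAIM (what is proved, stated in full; the proofs are below) =====
def Claim_equal_parse_goals_py : Prop := ∀ (goals_text : String), Dom_parse_goals_py goals_text → Spec_parse_goals_py goals_text (parse_goals_py goals_text)

-- ===== LEMMAS AND PROOFS =====

def pvMatch (pt line : String) : Bool := PySem.Str.isIn (PySem.Str.lower pt) (PySem.Str.lower line)

-- a first-wins insertion fold never touches a key outside its list
theorem pvGet_foldl_of_not_mem (pts : List String) (found : PySem.Dict String String)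
    (q : String → Bool) (v : String) (pt : String) (h : pt ∉ pts) :
    PySem.Dict.get? (pts.foldl (fun fd p => if !fd.contains p && q p then fd.insert p v else fd) found) pt
      = PySem.Dict.get? found pt := by
  induction pts generalizing found with
  | nil => rfl
  | cons p rest ih =>
    simp only [List.mem_cons, not_or] at h
    simp only [List.foldl_cons, ih _ h.2]
    split_ifs with hins
    · exact PySem.Dict.get?_insert_of_ne found v h.1
    · rfl

-- lookup after a first-wins insertion fold over distinct keys
theorem pvGet_foldl_mem (pts : List String) (found : PySem.Dict String String)
    (q : String → Bool) (v : String) (pt : String) (hm : pt ∈ pts) (hn : pts.Nodup) :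
    PySem.Dict.get? (pts.foldl (fun fd p => if !fd.contains p && q p then fd.insert p v else fd) found) pt
      = if (PySem.Dict.get? found pt).isSome then PySem.Dict.get? found pt
        else if q pt then some v else none := by
  induction pts generalizing found with
  | nil => cases hm
  | cons p rest ih =>
    simp only [List.nodup_cons] at hn
    simp only [List.foldl_cons]
    by_cases hp : pt = p
    · subst hp
      rw [pvGet_foldl_of_not_mem rest _ q v pt hn.1]
      simp only [PySem.Dict.contains_eq_isSome_get?]
      cases h : PySem.Dict.get? found pt with
      | some w => simp [h]
      | none =>
        cases hq : q pt with
        | true => simp [PySem.Dict.get?_insert_self]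
        | false => simp [h]
    · have hm' : pt ∈ rest := by cases hm with
        | head => exact absurd rfl hp
        | tail _ h => exact h
      by_cases hins : (!found.contains p && q p) = true
      · rw [if_pos hins, ih _ hm' hn.2, PySem.Dict.get?_insert_of_ne found v hp]
      · rw [if_neg hins, ih _ hm' hn.2]

-- one pass step of B: lookup after pvStep
theorem pvGet_step (found : PySem.Dict String String) (line pt : String)
    (hpt : pt ∈ pvPlannerTypes) :
    PySem.Dict.get? (pvStep found line) pt =
      if (PySem.Dict.get? found pt).isSome then PySem.Dict.get? found pt
      else if pvMatch pt line then some (pvDesc line) else none := by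
  have := pvGet_foldl_mem pvPlannerTypes found
      (fun p => PySem.Str.isIn (PySem.Str.lower p) (PySem.Str.lower line)) (pvDesc line) pt hpt
      (by decide)
  simpa [pvStep, pvMatch] using this

-- B's pass over all lines computes, per planner type, the first matching line's description
theorem pvGet_fold (lines : List String) (found : PySem.Dict String String) (pt : String)
    (hpt : pt ∈ pvPlannerTypes) :
    PySem.Dict.get? (lines.foldl pvStep found) pt =
      match PySem.Dict.get? found pt with
      | some v => some v
      | none => (lines.find? (pvMatch pt)).map pvDesc := by
  induction lines generalizing found with
  | nil => cases h : PySem.Dict.get? found pt <;> simp [h]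
  | cons line rest ih =>
    simp only [List.foldl_cons, ih, pvGet_step found line pt hpt]
    cases h : PySem.Dict.get? found pt with
    | some v => simp
    | none =>
      simp only [Option.isSome_none, Bool.false_eq_true, if_false, List.find?]
      cases hm : pvMatch pt line <;> simp

theorem pv_main (goals_text : String) :
    parse_goals_py goals_text = parse_goals_py_alt goals_text := by
  unfold parse_goals_py parse_goals_py_alt
  have hfold : ∀ pt : String,
      (fun line => PySem.Str.isIn (PySem.Str.lower pt) (PySem.Str.lower line)) = pvMatch pt :=
    fun _ => rfl
  have h1 := pvGet_fold (pvLines goals_text) PySem.Dict.empty "Data Strategy" (by decide)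
  have h2 := pvGet_fold (pvLines goals_text) PySem.Dict.empty "Product Strategy" (by decide)
  have h3 := pvGet_fold (pvLines goals_text) PySem.Dict.empty "Outreach Strategy" (by decide)
  simp only [show ∀ pt, PySem.Dict.get? (PySem.Dict.empty : PySem.Dict String String) pt = none
      from fun _ => rfl] at h1 h2 h3
  simp only [pvPlannerTypes, List.foldl, List.filterMap, hfold, h1, h2, h3]
  rcases (pvLines goals_text).find? (pvMatch "Data Strategy") with _ | l1 <;>
  rcases (pvLines goals_text).find? (pvMatch "Product Strategy") with _ | l2 <;>
  rcases (pvLines goals_text).find? (pvMatch "Outreach Strategy") with _ | l3 <;>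
    simp

-- ===== VERDICT (by name: the statement is the Claim_ definition above) =====
theorem parse_goals_py_spec : Claim_equal_parse_goals_py := by
  intro goals_text _
  unfold Spec_parse_goals_py
  exact pv_main goals_text
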